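-- pv_equiv track=rewrite | github.com/sbrehl/daily-coding-problem-python | daily_coding_problem11.py | preprocess_set
-- ===== SOURCE A (Python) =====
-- def preprocess_set(set_of_strings):
--     '''
--     preprocesses the set of strings into a dictionary
--
--     Parameters
--     ----------
--     set_of_strings : list
--         the list of strings to be preprocessed.
--
--     Returns
--     -------
--     autocomplete_dictionary : dictionary
--         a dictionary which contains all possible query strings as keys, and the
--         words of set_of_strings as values.
--
--     '''
--     autocomplete_dictionary = {}
--
--     for string in set_of_strings:
--         # loops over all the words in set_of_strings
--         current_string = ''
--         for letter in string:
--             # loops over the letters in the current word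
--             current_string += letter
--             # builds up the current_string by using every possible prefix of
--             # the word; e.g. for deer: 'd', 'de', 'dee', 'deer'
--             if current_string in autocomplete_dictionary:
--                 # if the current prefix is already present in the dictionary
--                 # the current word is appended to the prefix key
--                 autocomplete_dictionary[current_string].append(string)
--             else:
--                 # if the current prefix is not present, it is created
--                 autocomplete_dictionary[current_string] = [string]
--
--     return autocomplete_dictionary
-- ===== SOURCE B (Python) =====
-- def preprocess_set(set_of_strings):
--     all_prefixes = [s[:i + 1] for s in set_of_strings for i in range(len(s))]
--     return {p: [s for s in set_of_strings if s.startswith(p)]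
--             for p in dict.fromkeys(all_prefixes)}
-- ===== Notes on version B (the rewrite author's own statement) =====
-- stated objective: simpler
-- what changed: A builds the dict incrementally, appending the word to each prefix entry while extending a running string character by character; B first collects all prefixes of all words, deduplicates them in first-occurrence order, and then computes each prefix's value independently as a fresh scan of the input filtering the words that start with it.
import Mathlib
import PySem

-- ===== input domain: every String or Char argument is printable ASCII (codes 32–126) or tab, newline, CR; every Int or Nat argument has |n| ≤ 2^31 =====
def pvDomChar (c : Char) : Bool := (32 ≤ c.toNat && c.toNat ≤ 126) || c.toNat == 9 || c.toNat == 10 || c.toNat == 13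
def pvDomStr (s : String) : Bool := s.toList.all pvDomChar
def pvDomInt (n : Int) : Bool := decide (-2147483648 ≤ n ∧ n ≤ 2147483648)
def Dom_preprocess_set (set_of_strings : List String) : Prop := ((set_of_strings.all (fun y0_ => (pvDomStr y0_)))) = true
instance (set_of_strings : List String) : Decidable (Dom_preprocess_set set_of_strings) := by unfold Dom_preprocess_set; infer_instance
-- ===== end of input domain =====

-- B replaces A's incremental append-per-prefix dict building by a two-phase pipeline (collect and
-- dedup all prefixes, then compute each value as an independent filter of the input); simpler, not faster.

-- ===== PORT A =====
-- literal transliteration of A: outer loop over the words, inner loop extending current_string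
-- letter by letter, appending the word to an existing entry or creating a singleton entry
def preprocess_set (set_of_strings : List String) : List (String × List String) :=
  (set_of_strings.foldl
    (fun autocomplete_dictionary string =>
      (string.toList.foldl
        (fun (st : String × PySem.Dict String (List String)) letter =>
          let current_string := String.ofList (st.1.toList ++ [letter])
          let d := st.2
          (current_string,
            if d.contains current_string then
              d.insert current_string (d.getD current_string [] ++ [string])
            else
              d.insert current_string [string]))
        ("", autocomplete_dictionary)).2)
    PySem.Dict.empty).items

-- ===== PORT B =====
-- literal transliteration of B: all_prefixes comprehension, dict.fromkeys dedup, then a dict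
-- comprehension whose value is a filtering comprehension (its keys are distinct, so the resulting
-- association list is exactly this map)
def preprocess_set_alt (set_of_strings : List String) : List (String × List String) :=
  let all_prefixes := set_of_strings.flatMap (fun s =>
    (PySem.List.pyRange 0 (PySem.Str.len s)).map (fun i => PySem.Str.slice s none (some (i + 1))))
  (PySem.List.dedup all_prefixes).map (fun p =>
    (p, set_of_strings.filter (fun s => PySem.Str.startswith s p)))

-- ===== PRECONDITION & SPEC =====
def Spec_preprocess_set (set_of_strings : List String) (out : List (String × List String)) : Prop := out = preprocess_set_alt set_of_strings
instance (set_of_strings : List String) (out : List (String × List String)) : Decidable (Spec_preprocess_set set_of_strings out) := by unfold Spec_preprocess_set; infer_instance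

-- ===== CLAIM (what is proved, stated in full; the proofs are below) =====
def Claim_equal_preprocess_set : Prop := ∀ (set_of_strings : List String), Dom_preprocess_set set_of_strings → Spec_preprocess_set set_of_strings (preprocess_set set_of_strings)

-- ===== LEMMAS AND PROOFS =====

-- the nonempty prefixes of s, shortest first (proof-side normal form of both programs' prefix lists)
def Pfx (s : String) : List String :=
  (List.range s.toList.length).map (fun i => String.ofList (s.toList.take (i + 1)))

-- the (prefix, word) pairs A's nested loops touch, in touch order
def pairsOf (ws : List String) : List (String × String) :=
  ws.flatMap (fun s => (Pfx s).map (fun p => (p, s)))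

-- the prefixes A's inner loop visits starting from accumulated characters cs
def pfxFrom : List Char → List Char → List String
  | _, [] => []
  | cs, c :: l => String.ofList (cs ++ [c]) :: pfxFrom (cs ++ [c]) l

theorem pairsOf_cons (s : String) (ws : List String) :
    pairsOf (s :: ws) = (Pfx s).map (fun p => (p, s)) ++ pairsOf ws := by
  simp [pairsOf]

theorem str_ext {a b : String} (h : a.toList = b.toList) : a = b := by
  have := congrArg String.ofList h
  simpa using this

theorem pfxFrom_eq (l : List Char) : ∀ cs : List Char,
    pfxFrom cs l = (List.range l.length).map (fun i => String.ofList (cs ++ l.take (i + 1))) := by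
  induction l with
  | nil => intro cs; simp [pfxFrom]
  | cons c l ih =>
    intro cs
    simp only [pfxFrom, List.length_cons, List.range_succ_eq_map, List.map_cons, List.map_map]
    refine List.cons_eq_cons.mpr ⟨by simp, ?_⟩
    rw [ih (cs ++ [c])]
    apply List.map_congr_left
    intro i _
    simp [List.append_assoc]

-- B's prefix list for one word is Pfx
theorem pfxB_eq (s : String) :
    (PySem.List.pyRange 0 (PySem.Str.len s)).map (fun i => PySem.Str.slice s none (some (i + 1)))
      = Pfx s := by
  rw [PySem.Str.len_eq, PySem.List.pyRange_zero_natCast, List.map_map, Pfx]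
  apply List.map_congr_left
  intro k _
  apply str_ext
  have hc : ((k : Int) + 1) = ((k + 1 : Nat) : Int) := by push_cast; ring
  simp only [Function.comp_def]
  rw [PySem.Str.toList_slice, hc]
  simp only [PySem.Chars.slice_eq_listSlice, PySem.List.slice_to_natCast, String.toList_ofList]

-- A's if-then-else update is a modify
theorem updA_eq (d : PySem.Dict String (List String)) (k string : String) :
    (if d.contains k then d.insert k (d.getD k [] ++ [string]) else d.insert k [string])
      = d.modify k [] (· ++ [string]) := by
  by_cases h : d.contains k = true
  · simp [h, PySem.Dict.modify]
  · simp only [Bool.not_eq_true] at h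
    simp [h, PySem.Dict.modify, PySem.Dict.getD_of_not_contains d [] h]

-- A's inner loop over the letters = a fold of modifies over the visited prefixes
theorem innerA_eq (string : String) (l : List Char) : ∀ (cs : List Char) (d : PySem.Dict String (List String)),
    l.foldl
      (fun (st : String × PySem.Dict String (List String)) letter =>
        let current_string := String.ofList (st.1.toList ++ [letter])
        let d := st.2
        (current_string,
          if d.contains current_string then
            d.insert current_string (d.getD current_string [] ++ [string])
          else
            d.insert current_string [string]))
      (String.ofList cs, d)
    = (String.ofList (cs ++ l),
       (pfxFrom cs l).foldl (fun d k => d.modify k [] (· ++ [string])) d) := by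
  induction l with
  | nil => intro cs d; simp [pfxFrom]
  | cons c l ih =>
    intro cs d
    simp only [List.foldl_cons, String.toList_ofList, pfxFrom]
    rw [updA_eq, ih (cs ++ [c])]
    simp

-- A's whole nested loop = one fold of modifies over pairsOf
theorem dictA_eq (ws : List String) : ∀ d : PySem.Dict String (List String),
    ws.foldl
      (fun autocomplete_dictionary string =>
        (string.toList.foldl
          (fun (st : String × PySem.Dict String (List String)) letter =>
            let current_string := String.ofList (st.1.toList ++ [letter])
            let d := st.2
            (current_string,
              if d.contains current_string then
                d.insert current_string (d.getD current_string [] ++ [string])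
              else
                d.insert current_string [string]))
          ("", autocomplete_dictionary)).2) d
    = (pairsOf ws).foldl (fun d p => d.modify p.1 [] (· ++ [p.2])) d := by
  induction ws with
  | nil => intro d; simp [pairsOf]
  | cons s ws ih =>
    intro d
    have h0 : ("" : String) = String.ofList [] := rfl
    simp only [List.foldl_cons, h0, innerA_eq s s.toList [] d]
    rw [ih]
    have hp : pfxFrom [] s.toList = Pfx s := by
      rw [pfxFrom_eq]; simp [Pfx]
    rw [hp, pairsOf_cons, List.foldl_append, List.foldl_map]

theorem map_fst_pairsOf (ws : List String) :
    (pairsOf ws).map (·.1) = ws.flatMap Pfx := by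
  simp [pairsOf, List.map_flatMap, List.map_map, Function.comp_def]

theorem nodup_Pfx (s : String) : (Pfx s).Nodup := by
  apply List.Nodup.map_on _ (List.nodup_range)
  intro i hi j hj h
  have := congrArg String.toList h
  simp only [String.toList_ofList] at this
  have := congrArg List.length this
  simp only [List.length_take] at this
  simp only [List.mem_range] at hi hj
  omega

theorem mem_Pfx_iff (s k : String) (hk : k.toList ≠ []) :
    k ∈ Pfx s ↔ PySem.Str.startswith s k = true := by
  rw [PySem.Str.startswith_eq, PySem.Chars.startswith_iff]
  constructor
  · intro h
    simp only [Pfx, List.mem_map, List.mem_range] at h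
    obtain ⟨i, _, rfl⟩ := h
    simp only [String.toList_ofList]
    exact List.take_prefix _ _
  · intro h
    have hlen : k.toList.length ≤ s.toList.length := h.length_le
    have htake : k.toList = s.toList.take k.toList.length := List.prefix_iff_eq_take.mp h
    obtain ⟨m, hm⟩ : ∃ m, k.toList.length = m + 1 := by
      cases hlc : k.toList with
      | nil => exact absurd hlc hk
      | cons a t => exact ⟨t.length, by simp⟩
    simp only [Pfx, List.mem_map, List.mem_range]
    refine ⟨m, by omega, ?_⟩
    apply str_ext
    simp only [String.toList_ofList]
    rw [← hm, ← htake]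

-- the filtered pairs of one word as a function of startswith
theorem word_pairs_filter (s k : String) (hk : k.toList ≠ []) :
    (((Pfx s).map (fun p => (p, s))).filter (fun q => q.1 == k)).map (·.2)
      = if PySem.Str.startswith s k then [s] else [] := by
  rw [List.filter_map]
  simp only [Function.comp_def]
  rw [List.filter_beq, List.Nodup.count (nodup_Pfx s), List.map_map]
  by_cases h : k ∈ Pfx s
  · rw [if_pos h, if_pos ((mem_Pfx_iff s k hk).mp h)]
    simp
  · rw [if_neg h, if_neg (fun hs => h ((mem_Pfx_iff s k hk).mpr hs))]
    simp

theorem values_eq (ws : List String) (k : String) (hk : k.toList ≠ []) :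
    ((pairsOf ws).filter (fun p => p.1 == k)).map (·.2)
      = ws.filter (fun s => PySem.Str.startswith s k) := by
  induction ws with
  | nil => simp [pairsOf]
  | cons s ws ih =>
    rw [pairsOf_cons, List.filter_append, List.map_append, ih]
    rw [word_pairs_filter s k hk, List.filter_cons]
    split_ifs <;> simp

theorem key_nonempty (ws : List String) (k : String) (hk : k ∈ ws.flatMap Pfx) :
    k.toList ≠ [] := by
  simp only [List.mem_flatMap] at hk
  obtain ⟨s, _, hks⟩ := hk
  simp only [Pfx, List.mem_map, List.mem_range] at hks
  obtain ⟨i, hi, rfl⟩ := hks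
  simp only [String.toList_ofList]
  intro hnil
  have hlen := congrArg List.length hnil
  rw [List.length_take, Nat.min_eq_left (by omega : i + 1 ≤ s.toList.length)] at hlen
  simp at hlen

-- ===== VERDICT (by name: the statement is the Claim_ definition above) =====
theorem preprocess_set_spec : Claim_equal_preprocess_set := by
  unfold Claim_equal_preprocess_set
  intro ws _
  unfold Spec_preprocess_set preprocess_set preprocess_set_alt
  rw [dictA_eq]
  set D := (pairsOf ws).foldl (fun d p => d.modify p.1 [] (· ++ [p.2])) PySem.Dict.empty with hD
  have hnodup : D.keys.Nodup := by
    rw [hD]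
    exact PySem.Dict.nodup_keys_foldl_modify_key (pairsOf ws) Prod.fst []
      (fun _ p v => v ++ [p.2]) PySem.Dict.empty PySem.Dict.nodup_keys_empty
  have hkeys : D.keys = PySem.List.dedup (ws.flatMap Pfx) := by
    rw [hD]
    have := PySem.Dict.keys_foldl_modify_key (pairsOf ws) Prod.fst []
      (fun _ p v => v ++ [p.2]) PySem.Dict.empty
    rw [this, PySem.Dict.keys_empty, map_fst_pairsOf, PySem.List.dedup_eq_ofList]
    rfl
  rw [PySem.Dict.items_eq_map_keys D hnodup [], hkeys]
  have hpfx : ws.flatMap (fun s =>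
      (PySem.List.pyRange 0 (PySem.Str.len s)).map (fun i => PySem.Str.slice s none (some (i + 1))))
      = ws.flatMap Pfx := by
    exact List.flatMap_congr (fun s _ => pfxB_eq s)
  rw [hpfx]
  apply List.map_congr_left
  intro k hkmem
  have hk : k.toList ≠ [] := key_nonempty ws k (by
    have : k ∈ ws.flatMap Pfx := by
      have := hkmem
      exact (PySem.List.mem_dedup _ _).mp this
    exact this)
  have hget : D.getD k [] = ((pairsOf ws).filter (fun p => p.1 == k)).map (·.2) := by
    rw [hD]
    have := PySem.Dict.getD_foldl_modify_append (pairsOf ws) PySem.Dict.empty k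
    rw [this]
    simp
  rw [hget, values_eq ws k hk]
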